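-- pv_equiv track=rewrite | github.com/noble-platinate/Bonobo-Optimisation-for-VRP | vrp_GA.py | build_edge_table
-- ===== SOURCE A (Python) =====
-- def build_edge_table(parent1, parent2):
--     edge_table = {}
--     all_cities = set(parent1 + parent2)
--     for city in all_cities:
--         edge_table[city] = set()
--     # For parent1
--     n = len(parent1)
--     for idx, city in enumerate(parent1):
--         pred_idx = (idx - 1) % n
--         succ_idx = (idx + 1) % n
--         pred_city = parent1[pred_idx]
--         succ_city = parent1[succ_idx]
--         edge_table[city].update([pred_city, succ_city])
--     # For parent2
--     n = len(parent2)
--     for idx, city in enumerate(parent2):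
--         pred_idx = (idx - 1) % n
--         succ_idx = (idx + 1) % n
--         pred_city = parent2[pred_idx]
--         succ_city = parent2[succ_idx]
--         edge_table[city].update([pred_city, succ_city])
--     return edge_table
-- ===== SOURCE B (Python) =====
-- def build_edge_table(parent1, parent2):
--     # Different decomposition: index each parent's city positions once, then
--     # assemble each city's neighbour set directly from its own positions.
--     def positions(p):
--         pos = {}
--         for i, c in enumerate(p):
--             pos.setdefault(c, []).append(i)
--         return pos
--
--     pos1 = positions(parent1)
--     pos2 = positions(parent2)
--     edge_table = {}
--     for city in set(parent1 + parent2):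
--         nbrs = set()
--         for p, pos in ((parent1, pos1), (parent2, pos2)):
--             n = len(p)
--             for i in pos.get(city, []):
--                 nbrs.update((p[(i - 1) % n], p[(i + 1) % n]))
--         edge_table[city] = nbrs
--     return edge_table
-- ===== Notes on version B (the rewrite author's own statement) =====
-- stated objective: alternative
-- what changed: Instead of sweeping each parent and updating every visited city's set in a shared table, B first builds a positions index (city -> list of indices) per parent in one pass, then constructs each city's neighbour set directly from that city's own occurrences.
import Mathlib
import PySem

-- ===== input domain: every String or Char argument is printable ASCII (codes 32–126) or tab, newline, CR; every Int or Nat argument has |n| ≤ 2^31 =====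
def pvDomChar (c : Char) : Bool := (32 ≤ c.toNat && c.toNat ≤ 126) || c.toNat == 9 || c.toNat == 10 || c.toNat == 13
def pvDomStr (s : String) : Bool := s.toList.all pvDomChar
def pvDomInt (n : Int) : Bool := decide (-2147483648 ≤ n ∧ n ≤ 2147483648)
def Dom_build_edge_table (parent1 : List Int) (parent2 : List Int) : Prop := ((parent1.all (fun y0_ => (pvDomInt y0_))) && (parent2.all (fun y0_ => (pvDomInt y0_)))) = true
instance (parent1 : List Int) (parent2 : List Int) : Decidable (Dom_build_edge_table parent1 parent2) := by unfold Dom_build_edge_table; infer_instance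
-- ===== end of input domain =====

-- B replaces A's per-parent sweep that updates a shared table with a per-parent positions
-- index plus direct per-city assembly of each neighbour set (alternative decomposition, same cost).


-- ===== PORT A =====
-- one sweep over a parent; every city of the parent is a key of d (seeded), so
-- 'edge_table[city].update([...])' (never a KeyError here) is Dict.modify at that key.
def bet_pass (p : List Int) (d : PySem.Dict Int (PySem.Set Int)) : PySem.Dict Int (PySem.Set Int) :=
  let n : Int := p.length
  (PySem.List.enumerate p).foldl (fun d q =>
    let pred_city := PySem.List.pyGetD p (PySem.Int.mod (q.1 - 1) n) 0
    let succ_city := PySem.List.pyGetD p (PySem.Int.mod (q.1 + 1) n) 0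
    d.modify q.2 PySem.Set.empty (fun s => PySem.Set.update s [pred_city, succ_city])) d

def build_edge_table (parent1 : List Int) (parent2 : List Int) : List (Int × List Int) :=
  let all_cities : PySem.Set Int := PySem.Set.ofList (parent1 ++ parent2)
  let seeded : PySem.Dict Int (PySem.Set Int) :=
    all_cities.foldl (fun d city => d.insert city PySem.Set.empty) PySem.Dict.empty
  (bet_pass parent2 (bet_pass parent1 seeded)).items

-- ===== PORT B =====
-- pos.setdefault(c, []).append(i)  is  d[c] = d.get(c, []) + [i]  = Dict.modify c [] (· ++ [i])
def bet_positions (p : List Int) : PySem.Dict Int (List Int) :=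
  (PySem.List.enumerate p).foldl (fun d q => d.modify q.2 [] (fun l => l ++ [q.1])) PySem.Dict.empty

def bet_addNbrs (p : List Int) (idxs : List Int) (s0 : PySem.Set Int) : PySem.Set Int :=
  let n : Int := p.length
  idxs.foldl (fun s i =>
    PySem.Set.update s [PySem.List.pyGetD p (PySem.Int.mod (i - 1) n) 0,
                        PySem.List.pyGetD p (PySem.Int.mod (i + 1) n) 0]) s0

def build_edge_table_alt (parent1 : List Int) (parent2 : List Int) : List (Int × List Int) :=
  ((PySem.Set.ofList (parent1 ++ parent2)).foldl (fun d city =>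
      d.insert city (bet_addNbrs parent2 ((bet_positions parent2).getD city [])
                      (bet_addNbrs parent1 ((bet_positions parent1).getD city []) PySem.Set.empty)))
    PySem.Dict.empty).items

-- ===== PRECONDITION & SPEC =====
def Spec_build_edge_table (parent1 : List Int) (parent2 : List Int) (out : List (Int × List Int)) : Prop := out = build_edge_table_alt parent1 parent2
instance (parent1 : List Int) (parent2 : List Int) (out : List (Int × List Int)) : Decidable (Spec_build_edge_table parent1 parent2 out) := by unfold Spec_build_edge_table; infer_instance

-- ===== CLAIM (what is proved, stated in full; the proofs are below) =====
def Claim_equal_build_edge_table : Prop := ∀ (parent1 : List Int) (parent2 : List Int), Dom_build_edge_table parent1 parent2 → Spec_build_edge_table parent1 parent2 (build_edge_table parent1 parent2)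

-- ===== LEMMAS AND PROOFS =====

-- a modify-fold's value at c is the fold of just the entries keyed c
lemma bet_getD_foldl_modify_filter {ν : Type} (l : List (Int × Int)) (d : PySem.Dict Int ν)
    (d0 : ν) (f : Int × Int → ν → ν) (c : Int) :
    (l.foldl (fun d q => d.modify q.2 d0 (f q)) d).getD c d0
      = ((l.filter (fun q => q.2 == c)).foldl (fun v q => f q v) (d.getD c d0)) := by
  induction l generalizing d with
  | nil => rfl
  | cons q t ih =>
    rw [List.foldl_cons, List.filter_cons, ih, PySem.Dict.getD_modify]
    by_cases h : q.2 = c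
    · simp [h]
    · simp [h, Ne.symm h]

-- the seeded table holds the empty set at every key
lemma bet_getD_seed (l : List Int) (d : PySem.Dict Int (PySem.Set Int)) (c : Int)
    (h : d.getD c PySem.Set.empty = PySem.Set.empty) :
    ((l.foldl (fun d city => d.insert city PySem.Set.empty) d).getD c PySem.Set.empty)
      = PySem.Set.empty := by
  induction l generalizing d with
  | nil => exact h
  | cons x t ih =>
    rw [List.foldl_cons]
    apply ih
    rw [PySem.Dict.getD_insert]
    split
    · rfl
    · exact h

-- updating a set with elements it already has changes nothing
lemma bet_set_update_subset (s : PySem.Set Int) (l : List Int) (h : ∀ x ∈ l, x ∈ s) :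
    PySem.Set.update s l = s := by
  induction l generalizing s with
  | nil => rfl
  | cons x t ih =>
    have hx : PySem.Set.add s x = s := PySem.Set.add_of_mem (h x (by simp))
    show PySem.Set.update (PySem.Set.add s x) t = s
    rw [hx]
    exact ih s (fun y hy => h y (by simp [hy]))

-- positions index: the list stored at c is the list of indices where p has c
lemma bet_positions_getD (p : List Int) (c : Int) :
    (bet_positions p).getD c []
      = ((PySem.List.enumerate p).filter (fun q => q.2 == c)).map (·.1) := by
  unfold bet_positions
  have hmap : (PySem.List.enumerate p).foldl (fun d q => d.modify q.2 [] (fun l => l ++ [q.1])) PySem.Dict.empty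
      = ((PySem.List.enumerate p).map (fun q => (q.2, q.1))).foldl
          (fun d r => d.modify r.1 [] (fun l => l ++ [r.2])) PySem.Dict.empty := by
    rw [List.foldl_map]
  rw [hmap, PySem.Dict.getD_foldl_modify_append, List.filter_map, List.map_map]
  simp [Function.comp_def]

-- folding addNbrs over the mapped index list is the filtered enumerate fold
lemma bet_addNbrs_map (p : List Int) (lf : List (Int × Int)) (s : PySem.Set Int) :
    bet_addNbrs p (lf.map (·.1)) s
      = lf.foldl (fun s q =>
          PySem.Set.update s [PySem.List.pyGetD p (PySem.Int.mod (q.1 - 1) (p.length : Int)) 0,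
                              PySem.List.pyGetD p (PySem.Int.mod (q.1 + 1) (p.length : Int)) 0]) s := by
  unfold bet_addNbrs
  rw [List.foldl_map]

-- value of A's table at any city c equals B's assembled neighbour set
lemma bet_value_eq (parent1 parent2 : List Int) (c : Int) :
    (bet_pass parent2 (bet_pass parent1
        ((PySem.Set.ofList (parent1 ++ parent2)).foldl
          (fun d city => d.insert city PySem.Set.empty) PySem.Dict.empty))).getD c PySem.Set.empty
      = bet_addNbrs parent2 ((bet_positions parent2).getD c [])
          (bet_addNbrs parent1 ((bet_positions parent1).getD c []) PySem.Set.empty) := by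
  unfold bet_pass
  rw [bet_getD_foldl_modify_filter, bet_getD_foldl_modify_filter,
      bet_getD_seed _ _ _ (by simp [PySem.Dict.getD_empty]),
      bet_positions_getD, bet_positions_getD, bet_addNbrs_map, bet_addNbrs_map]

-- keys of A's finished table: the sweeps touch only seeded keys, so keys = all_cities
lemma bet_keys_pass (p : List Int) (d : PySem.Dict Int (PySem.Set Int))
    (h : ∀ x ∈ p, x ∈ d.keys) : (bet_pass p d).keys = d.keys := by
  unfold bet_pass
  rw [PySem.Dict.keys_foldl_modify_key]
  rw [PySem.List.map_snd_enumerate]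
  exact bet_set_update_subset _ _ h

lemma bet_keys_seed (l : List Int) :
    ((PySem.Set.ofList l).foldl (fun d city => d.insert city PySem.Set.empty)
        (PySem.Dict.empty : PySem.Dict Int (PySem.Set Int))).keys = PySem.Set.ofList l := by
  rw [PySem.Dict.keys_foldl_insert, PySem.Dict.keys_empty]
  show (PySem.Set.ofList l).foldl PySem.Set.add [] = _
  rw [← PySem.Set.ofList_eq_foldl]
  exact PySem.Set.ofList_eq_self_of_nodup _ (PySem.Set.nodup_ofList l)

theorem build_edge_table_spec : Claim_equal_build_edge_table := by
  intro parent1 parent2 _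
  unfold Spec_build_edge_table build_edge_table build_edge_table_alt
  have hS : (PySem.Set.ofList (parent1 ++ parent2)).Nodup := PySem.Set.nodup_ofList _
  have hk0 := bet_keys_seed (parent1 ++ parent2)
  have hmem : ∀ x ∈ parent1 ++ parent2, x ∈ PySem.Set.ofList (parent1 ++ parent2) := by
    intro x hx; exact (PySem.Set.mem_ofList _ _).mpr hx
  have hk1 : (bet_pass parent1 ((PySem.Set.ofList (parent1 ++ parent2)).foldl
      (fun d city => d.insert city PySem.Set.empty) PySem.Dict.empty)).keys
      = PySem.Set.ofList (parent1 ++ parent2) := by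
    rw [bet_keys_pass _ _ (by rw [hk0]; intro x hx; exact hmem x (by simp [hx]))]; exact hk0
  have hk2 : (bet_pass parent2 (bet_pass parent1 ((PySem.Set.ofList (parent1 ++ parent2)).foldl
      (fun d city => d.insert city PySem.Set.empty) PySem.Dict.empty))).keys
      = PySem.Set.ofList (parent1 ++ parent2) := by
    rw [bet_keys_pass _ _ (by rw [hk1]; intro x hx; exact hmem x (by simp [hx]))]; exact hk1
  have hB := PySem.Dict.items_foldl_insert_fresh (PySem.Set.ofList (parent1 ++ parent2))
      (fun c => c)
      (fun city => bet_addNbrs parent2 ((bet_positions parent2).getD city [])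
        (bet_addNbrs parent1 ((bet_positions parent1).getD city []) PySem.Set.empty))
      PySem.Dict.empty (by intro a _; exact PySem.Dict.contains_empty a) (by simp only [List.map_id_fun', id]; exact hS)
  rw [PySem.Dict.items_eq_map_keys _ (by rw [hk2]; exact hS) PySem.Set.empty, hk2, hB,
      show (PySem.Dict.empty : PySem.Dict Int (PySem.Set Int)).items = [] from rfl]
  rw [List.nil_append]
  refine List.map_congr_left ?_
  intro c _
  exact congrArg (fun s => (c, s)) (bet_value_eq parent1 parent2 c)
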